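-- pv_equiv track=rewrite | github.com/mlelarge/graph-conjectures | problems/unit_vector_flows/scripts/flower_cdc.py | flower_cdc_v1
-- ===== SOURCE A (Python) =====
-- def _flower_relabel(k: int) -> dict[tuple, int]:
--     """Reproduce the integer relabel used by ``flower_snark_with_labels``."""
--     n = 2 * k + 1
--     nodes: list[tuple] = []
--     for i in range(n):
--         nodes.append(("a", i))
--         nodes.append(("b", i))
--         nodes.append(("c", i))
--         nodes.append(("d", i))
--     nodes = sorted(nodes)
--     return {node: idx for idx, node in enumerate(nodes)}
--
-- def _to_int_cycle(path: list[tuple], relabel: dict[tuple, int]) -> tuple: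
--     return tuple(relabel[v] for v in path)
--
-- def flower_cdc_v1(k: int) -> list[tuple]:
--     """Attempt v1: b-cycle + cd-cycle + bc-shuttles + bd-shuttles
--     for every i in Z/n. *Expected to over-cover internal a_i b_i spokes
--     by a factor of 2*, kept here as documented failure.
--     """
--     n = 2 * k + 1
--     relabel = _flower_relabel(k)
--     cycles_abs: list[list[tuple]] = []
--
--     # b-cycle: b_0 b_1 ... b_{n-1}
--     cycles_abs.append([("b", i) for i in range(n)])
--
--     # cd-cycle: c_0 c_1 ... c_{n-1} d_0 d_1 ... d_{n-1}
--     cycles_abs.append(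
--         [("c", i) for i in range(n)] + [("d", i) for i in range(n)]
--     )
--
--     # bc-shuttle at i (i = 0..n-2):
--     #   a_i, b_i, b_{i+1}, a_{i+1}, c_{i+1}, c_i  (length 6)
--     for i in range(n - 1):
--         cycles_abs.append([
--             ("a", i), ("b", i), ("b", i + 1),
--             ("a", i + 1), ("c", i + 1), ("c", i),
--         ])
--
--     # bd-shuttle at i (i = 0..n-2):
--     for i in range(n - 1):
--         cycles_abs.append([
--             ("a", i), ("b", i), ("b", i + 1),
--             ("a", i + 1), ("d", i + 1), ("d", i),
--         ])
--
--     return [_to_int_cycle(c, relabel) for c in cycles_abs]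
-- ===== SOURCE B (Python) =====
-- def flower_cdc_v1(k: int) -> list[tuple]:
--     """Closed-form relabel: node ('a',i)->i, ('b',i)->n+i, ('c',i)->2n+i,
--     ('d',i)->3n+i, so no node list, no sort, no dict is built."""
--     n = 2 * k + 1
--     out = [
--         tuple(n + i for i in range(n)),
--         tuple([2 * n + i for i in range(n)] + [3 * n + i for i in range(n)]),
--     ]
--     for i in range(n - 1):
--         out.append((i, n + i, n + i + 1, i + 1, 2 * n + i + 1, 2 * n + i))
--     for i in range(n - 1):
--         out.append((i, n + i, n + i + 1, i + 1, 3 * n + i + 1, 3 * n + i))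
--     return out
-- ===== Notes on version B (the rewrite author's own statement) =====
-- stated objective: faster
-- what changed: B replaces A's build-all-nodes, sort, enumerate-into-a-dict relabeling by the closed-form index formula ('a',i)->i, ('b',i)->n+i, ('c',i)->2n+i, ('d',i)->3n+i (the sorted order groups tags then indices), emitting each integer cycle directly.
import Mathlib
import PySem

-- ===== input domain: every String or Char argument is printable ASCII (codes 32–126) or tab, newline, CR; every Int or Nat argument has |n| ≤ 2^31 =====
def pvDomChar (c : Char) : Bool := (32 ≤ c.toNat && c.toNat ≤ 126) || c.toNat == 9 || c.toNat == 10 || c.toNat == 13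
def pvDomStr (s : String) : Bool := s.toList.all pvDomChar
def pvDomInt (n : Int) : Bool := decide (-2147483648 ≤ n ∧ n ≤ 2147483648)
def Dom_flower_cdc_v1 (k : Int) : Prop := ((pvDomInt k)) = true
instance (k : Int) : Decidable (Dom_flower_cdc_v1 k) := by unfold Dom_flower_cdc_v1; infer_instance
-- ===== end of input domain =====

-- B replaces A's build-sort-enumerate relabel dict by the closed-form index
-- (('a',i)↦i, ('b',i)↦n+i, ('c',i)↦2n+i, ('d',i)↦3n+i) and emits the integer
-- cycles directly (objective: faster, O(n) vs O(n log n)).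

-- ===== PORT A =====
-- _flower_relabel
def pvFlowerRelabel (k : Int) : PySem.Dict (String × Int) Int :=
  let n : Int := 2 * k + 1
  let nodes : List (String × Int) :=
    (PySem.List.pyRange 0 n 1).foldl
      (fun acc i => acc ++ [("a", i), ("b", i), ("c", i), ("d", i)]) []
  let nodes := PySem.List.sorted2 nodes (fun p => p.1) (fun p => p.2) false
  PySem.Dict.ofList ((PySem.List.enumerate nodes 0).map (fun p => (p.2, p.1)))

-- _to_int_cycle; relabel[v] raises KeyError on a missing key, but every path
-- node is a key of the relabel dict here, so the default is never taken.
def pvToIntCycle (path : List (String × Int)) (relabel : PySem.Dict (String × Int) Int) : List Int :=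
  path.map (fun v => (relabel.get? v).getD 0)

def flower_cdc_v1 (k : Int) : List (List Int) :=
  let n : Int := 2 * k + 1
  let relabel := pvFlowerRelabel k
  let cycles1 : List (List (String × Int)) :=
    [] ++ [(PySem.List.pyRange 0 n 1).map (fun i => ("b", i))]
  let cycles2 := cycles1 ++
    [(PySem.List.pyRange 0 n 1).map (fun i => ("c", i)) ++
     (PySem.List.pyRange 0 n 1).map (fun i => ("d", i))]
  let cycles3 := (PySem.List.pyRange 0 (n - 1) 1).foldl
    (fun acc i => acc ++ [[("a", i), ("b", i), ("b", i + 1), ("a", i + 1), ("c", i + 1), ("c", i)]])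
    cycles2
  let cycles4 := (PySem.List.pyRange 0 (n - 1) 1).foldl
    (fun acc i => acc ++ [[("a", i), ("b", i), ("b", i + 1), ("a", i + 1), ("d", i + 1), ("d", i)]])
    cycles3
  cycles4.map (fun c => pvToIntCycle c relabel)

-- ===== PORT B =====
def flower_cdc_v1_alt (k : Int) : List (List Int) :=
  let n : Int := 2 * k + 1
  let out : List (List Int) :=
    [(PySem.List.pyRange 0 n 1).map (fun i => n + i),
     (PySem.List.pyRange 0 n 1).map (fun i => 2 * n + i) ++
       (PySem.List.pyRange 0 n 1).map (fun i => 3 * n + i)]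
  let out := (PySem.List.pyRange 0 (n - 1) 1).foldl
    (fun acc i => acc ++ [[i, n + i, n + i + 1, i + 1, 2 * n + i + 1, 2 * n + i]]) out
  (PySem.List.pyRange 0 (n - 1) 1).foldl
    (fun acc i => acc ++ [[i, n + i, n + i + 1, i + 1, 3 * n + i + 1, 3 * n + i]]) out

-- ===== PRECONDITION & SPEC =====
def Spec_flower_cdc_v1 (k : Int) (out : List (List Int)) : Prop := out = flower_cdc_v1_alt k
instance (k : Int) (out : List (List Int)) : Decidable (Spec_flower_cdc_v1 k out) := by unfold Spec_flower_cdc_v1; infer_instance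

-- ===== CLAIM (what is proved, stated in full; the proofs are below) =====
def Claim_equal_flower_cdc_v1 : Prop := ∀ (k : Int), Dom_flower_cdc_v1 k → Spec_flower_cdc_v1 k (flower_cdc_v1 k)

-- ===== LEMMAS AND PROOFS =====

-- proof-side helpers
def pvTag (s : String) : Int := if s = "b" then 1 else if s = "c" then 2 else if s = "d" then 3 else 0
def pvKey (n : Int) (p : String × Int) : Int := n * pvTag p.1 + p.2

def pvBlock (n : Int) (s : String) : List (String × Int) :=
  (PySem.List.pyRange 0 n 1).map (fun i => (s, i))

def pvL (n : Int) : List (String × Int) :=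
  pvBlock n "a" ++ pvBlock n "b" ++ pvBlock n "c" ++ pvBlock n "d"

def pvNodes (k : Int) : List (String × Int) :=
  (PySem.List.pyRange 0 (2 * k + 1) 1).foldl
    (fun acc i => acc ++ [("a", i), ("b", i), ("c", i), ("d", i)]) []

def pvPairs (n : Int) : List ((String × Int) × Int) :=
  ((List.range n.toNat).map (fun j : Nat => ((("a", (j : Int)) : String × Int), (j : Int)))
    ++ (List.range n.toNat).map (fun j : Nat => ((("b", (j : Int)) : String × Int), ((n.toNat : Int)) + j))
    ++ (List.range n.toNat).map (fun j : Nat => ((("c", (j : Int)) : String × Int), 2 * ((n.toNat : Int)) + j))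
    ++ (List.range n.toNat).map (fun j : Nat => ((("d", (j : Int)) : String × Int), 3 * ((n.toNat : Int)) + j)))

lemma pvR_eq (n : Int) : PySem.List.pyRange 0 n 1 = (List.range n.toNat).map (fun k : Nat => (k : Int)) := by
  by_cases h : n ≤ 0
  · have h0 : n.toNat = 0 := by omega
    rw [h0]
    simp [PySem.List.pyRange, not_lt.mpr h]
  · have h1 : n = (n.toNat : Int) := by omega
    rw [h1, PySem.List.pyRange_zero_natCast]
    rw [show ((n.toNat : Int)).toNat = n.toNat from by omega]

lemma perm4 {α β : Type} (a b c d : α → β) (l : List α) :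
    (l.map a ++ l.map b ++ l.map c ++ l.map d).Perm
      (l.flatMap fun i => [a i, b i, c i, d i]) := by
  induction l with
  | nil => simp
  | cons x l ih =>
    simp only [List.map_cons, List.flatMap_cons, List.cons_append, List.append_assoc]
    refine List.Perm.cons _ ?_
    have s1 : (l.map a ++ (b x :: (l.map b ++ (c x :: (l.map c ++ (d x :: l.map d)))))).Perm
        (b x :: (l.map a ++ (l.map b ++ (c x :: (l.map c ++ (d x :: l.map d)))))) :=
      List.perm_middle
    refine s1.trans (List.Perm.cons _ ?_)
    have s2 : ((l.map a ++ l.map b) ++ (c x :: (l.map c ++ (d x :: l.map d)))).Perm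
        (c x :: ((l.map a ++ l.map b) ++ (l.map c ++ (d x :: l.map d)))) :=
      List.perm_middle
    rw [← List.append_assoc]
    refine s2.trans (List.Perm.cons _ ?_)
    have s3 : (((l.map a ++ l.map b) ++ l.map c) ++ (d x :: l.map d)).Perm
        (d x :: (((l.map a ++ l.map b) ++ l.map c) ++ l.map d)) :=
      List.perm_middle
    rw [← List.append_assoc]
    refine s3.trans (List.Perm.cons _ ?_)
    simpa [List.append_assoc] using ih

lemma enumerate_map_range {α : Type} (f : Nat → α) (m : Nat) (s : Int) :
    PySem.List.enumerate ((List.range m).map f) s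
      = (List.range m).map (fun k : Nat => ((s + (k : Int), f k) : Int × α)) := by
  apply List.ext_getElem
  · simp [PySem.List.length_enumerate]
  · intro i h1 h2
    rw [PySem.List.getElem_enumerate]
    simp

lemma insertBy_congr {α : Type} (before before' : α → α → Bool) (x : α) (ys : List α)
    (h : ∀ y ∈ ys, before x y = before' x y) :
    PySem.List.insertBy before x ys = PySem.List.insertBy before' x ys := by
  induction ys with
  | nil => rfl
  | cons y ys ih =>
    simp only [PySem.List.insertBy]
    rw [h y (by simp)]
    split
    · rfl
    · rw [ih (fun z hz => h z (by simp [hz]))]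

lemma foldl_insertBy_congr {α : Type} (before before' : α → α → Bool) (S : α → Prop)
    (hS : ∀ p q, S p → S q → before p q = before' p q) :
    ∀ (xs acc : List α), (∀ x ∈ xs, S x) → (∀ x ∈ acc, S x) →
    xs.foldl (fun a x => PySem.List.insertBy before x a) acc
      = xs.foldl (fun a x => PySem.List.insertBy before' x a) acc := by
  intro xs
  induction xs with
  | nil => intro acc _ _; rfl
  | cons x xs ih =>
    intro acc hxs hacc
    simp only [List.foldl_cons]
    rw [insertBy_congr before before' x acc
        (fun y hy => hS x y (hxs x (by simp)) (hacc y hy))]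
    exact ih _ (fun z hz => hxs z (by simp [hz]))
      (fun z hz => by
        rcases (PySem.List.mem_insertBy before' x z acc).mp hz with rfl | hz
        · exact hxs z (by simp)
        · exact hacc z hz)

lemma cmp_agree (n : Int) (p q : String × Int)
    (hp1 : p.1 = "a" ∨ p.1 = "b" ∨ p.1 = "c" ∨ p.1 = "d") (hp2 : 0 ≤ p.2 ∧ p.2 < n)
    (hq1 : q.1 = "a" ∨ q.1 = "b" ∨ q.1 = "c" ∨ q.1 = "d") (hq2 : 0 ≤ q.2 ∧ q.2 < n) :
    (decide (p.1 < q.1) || (!decide (q.1 < p.1) && decide (p.2 < q.2)))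
      = decide (pvKey n p < pvKey n q) := by
  obtain ⟨p1, p2⟩ := p
  obtain ⟨q1, q2⟩ := q
  simp only at hp1 hp2 hq1 hq2
  rw [Bool.eq_iff_iff]
  simp only [Bool.or_eq_true, Bool.and_eq_true, Bool.not_eq_eq_eq_not, Bool.not_true,
    decide_eq_true_eq, decide_eq_false_iff_not, String.lt_iff_toList_lt, pvKey, pvTag]
  have hab : (['a']:List Char) < ['b'] := by decide
  have hac : (['a']:List Char) < ['c'] := by decide
  have had : (['a']:List Char) < ['d'] := by decide
  have hbc : (['b']:List Char) < ['c'] := by decide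
  have hbd : (['b']:List Char) < ['d'] := by decide
  have hcd : (['c']:List Char) < ['d'] := by decide
  have hba : ¬ (['b']:List Char) < ['a'] := by decide
  have hca : ¬ (['c']:List Char) < ['a'] := by decide
  have hcb : ¬ (['c']:List Char) < ['b'] := by decide
  have hda : ¬ (['d']:List Char) < ['a'] := by decide
  have hdb : ¬ (['d']:List Char) < ['b'] := by decide
  have hdc : ¬ (['d']:List Char) < ['c'] := by decide
  rcases hp1 with rfl | rfl | rfl | rfl <;> rcases hq1 with rfl | rfl | rfl | rfl <;>
    simp [hab, hac, had, hbc, hbd, hcd, hba, hca, hcb, hda, hdb, hdc] <;> omega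

lemma pvNodes_eq (k : Int) :
    pvNodes k = (PySem.List.pyRange 0 (2 * k + 1) 1).flatMap
      (fun i => [("a", i), ("b", i), ("c", i), ("d", i)]) := by
  unfold pvNodes
  rw [PySem.List.foldl_append_eq_flatMap]
  simp

lemma mem_pvNodes (k : Int) (p : String × Int) (hp : p ∈ pvNodes k) :
    (p.1 = "a" ∨ p.1 = "b" ∨ p.1 = "c" ∨ p.1 = "d") ∧ 0 ≤ p.2 ∧ p.2 < 2 * k + 1 := by
  rw [pvNodes_eq, List.mem_flatMap] at hp
  obtain ⟨i, hi, hp⟩ := hp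
  rw [PySem.List.mem_pyRange_one] at hi
  simp only [List.mem_cons, List.not_mem_nil, or_false] at hp
  rcases hp with rfl | rfl | rfl | rfl <;> simp <;> omega

lemma pairwise_pvL (n : Int) : (pvL n).Pairwise (fun p q => pvKey n p < pvKey n q) := by
  have hblock : ∀ (s : String), (pvBlock n s).Pairwise (fun p q => pvKey n p < pvKey n q) := by
    intro s
    rw [pvBlock, pvR_eq, List.map_map, List.pairwise_map]
    refine List.pairwise_lt_range.imp ?_
    intro a b hab
    simp only [Function.comp, pvKey]
    omega
  have hmem : ∀ (s : String) (p : String × Int), p ∈ pvBlock n s →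
      p.1 = s ∧ 0 ≤ p.2 ∧ p.2 < n := by
    intro s p hp
    rw [pvBlock, List.mem_map] at hp
    obtain ⟨i, hi, rfl⟩ := hp
    rw [PySem.List.mem_pyRange_one] at hi
    exact ⟨rfl, hi.1, hi.2⟩
  have cross_help : ∀ (p2 q2 a b : Int), 0 ≤ p2 → p2 < n → 0 ≤ q2 → a + 1 ≤ b →
      n * a + p2 < n * b + q2 := by
    intro p2 q2 a b h1 h2 h3 h4
    nlinarith
  have hcross2 : ∀ (s t : String) (a b : Int), pvTag s = a → pvTag t = b → a + 1 ≤ b →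
      ∀ p ∈ pvBlock n s, ∀ q ∈ pvBlock n t, pvKey n p < pvKey n q := by
    intro s t a b hsa htb hab p hp q hq
    obtain ⟨hp1, hp2⟩ := hmem s p hp
    obtain ⟨hq1, hq2⟩ := hmem t q hq
    simp only [pvKey, hp1, hq1, hsa, htb]
    exact cross_help p.2 q.2 a b hp2.1 hp2.2 hq2.1 hab
  rw [pvL]
  rw [List.pairwise_append]
  refine ⟨?_, ?_, ?_⟩
  · rw [List.pairwise_append]
    refine ⟨?_, ?_, ?_⟩
    · rw [List.pairwise_append]
      exact ⟨hblock "a", hblock "b", hcross2 "a" "b" 0 1 (by simp [pvTag]) (by simp [pvTag]) (by omega)⟩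
    · exact hblock "c"
    · intro p hp q hq
      rw [List.mem_append] at hp
      rcases hp with hp | hp
      · exact hcross2 "a" "c" 0 2 (by simp [pvTag]) (by simp [pvTag]) (by omega) p hp q hq
      · exact hcross2 "b" "c" 1 2 (by simp [pvTag]) (by simp [pvTag]) (by omega) p hp q hq
  · exact hblock "d"
  · intro p hp q hq
    rw [List.mem_append, List.mem_append] at hp
    rcases hp with (hp | hp) | hp
    · exact hcross2 "a" "d" 0 3 (by simp [pvTag]) (by simp [pvTag]) (by omega) p hp q hq
    · exact hcross2 "b" "d" 1 3 (by simp [pvTag]) (by simp [pvTag]) (by omega) p hp q hq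
    · exact hcross2 "c" "d" 2 3 (by simp [pvTag]) (by simp [pvTag]) (by omega) p hp q hq

lemma nodup_pvL (n : Int) : (pvL n).Nodup :=
  (pairwise_pvL n).imp (fun h => by intro e; rw [e] at h; exact lt_irrefl _ h)

lemma perm_pvL (k : Int) : (pvL (2 * k + 1)).Perm (pvNodes k) := by
  rw [pvNodes_eq, pvL]
  exact perm4 _ _ _ _ _

lemma sorted_nodes (k : Int) :
    PySem.List.sorted2 (pvNodes k) (fun p => p.1) (fun p => p.2) false
      = pvL (2 * k + 1) := by
  have h1 : PySem.List.sorted2 (pvNodes k) (fun p => p.1) (fun p => p.2) false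
      = PySem.List.sorted (pvNodes k) (pvKey (2 * k + 1)) false := by
    rw [PySem.List.sorted_eq_foldl_insertBy]
    show (pvNodes k).foldl _ [] = _
    refine foldl_insertBy_congr _ _ (fun p => p ∈ pvNodes k) ?_ (pvNodes k) [] (fun x hx => hx) (by simp)
    intro p q hp hq
    obtain ⟨hp1, hp2⟩ := mem_pvNodes k p hp
    obtain ⟨hq1, hq2⟩ := mem_pvNodes k q hq
    exact cmp_agree (2 * k + 1) p q hp1 hp2 hq1 hq2
  rw [h1]
  exact PySem.List.sorted_eq_of_perm_of_pairwise_lt _ _ _ (perm_pvL k) (pairwise_pvL (2 * k + 1))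

lemma map_fst_pvPairs (n : Int) : (pvPairs n).map (fun p => p.1) = pvL n := by
  simp only [pvPairs, pvL, pvBlock, pvR_eq, List.map_map, List.map_append]
  rfl

lemma block_eq (n : Int) (s : String) :
    pvBlock n s = (List.range n.toNat).map (fun j : Nat => ((s, (j : Int)) : String × Int)) := by
  rw [pvBlock, pvR_eq, List.map_map]
  rfl

lemma relabel_items (k : Int) : (pvFlowerRelabel k).items = pvPairs (2 * k + 1) := by
  show (PySem.Dict.ofList ((PySem.List.enumerate
      (PySem.List.sorted2 (pvNodes k) (fun p => p.1) (fun p => p.2) false) 0).map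
        (fun p => (p.2, p.1)))).items = _
  rw [sorted_nodes k]
  have hP : (PySem.List.enumerate (pvL (2 * k + 1)) 0).map (fun p => (p.2, p.1))
      = pvPairs (2 * k + 1) := by
    rw [pvL]
    rw [PySem.List.enumerate_append, PySem.List.enumerate_append, PySem.List.enumerate_append]
    simp only [block_eq, enumerate_map_range, List.map_append, List.map_map,
      List.length_append, List.length_map, List.length_range]
    rw [pvPairs]
    congr 1
    · congr 1
      · congr 1
        · refine List.map_congr_left ?_
          intro j hj
          simp only [Function.comp]
          refine Prod.ext rfl ?_
          push_cast
          omega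
        · refine List.map_congr_left ?_
          intro j hj
          simp only [Function.comp]
          refine Prod.ext rfl ?_
          push_cast
          omega
      · refine List.map_congr_left ?_
        intro j hj
        simp only [Function.comp]
        refine Prod.ext rfl ?_
        push_cast
        omega
    · refine List.map_congr_left ?_
      intro j hj
      simp only [Function.comp]
      refine Prod.ext rfl ?_
      push_cast
      omega
  rw [hP]
  have hfresh : ∀ a ∈ pvPairs (2 * k + 1),
      (PySem.Dict.empty : PySem.Dict (String × Int) Int).contains a.1 = false := by
    intro a _
    exact PySem.Dict.contains_empty a.1
  have hnodup : ((pvPairs (2 * k + 1)).map (fun p => p.1)).Nodup := by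
    rw [map_fst_pvPairs]
    exact nodup_pvL _
  have h := PySem.Dict.items_foldl_insert_fresh (pvPairs (2 * k + 1))
    (fun p => p.1) (fun p => p.2) (PySem.Dict.empty : PySem.Dict (String × Int) Int) hfresh hnodup
  show ((pvPairs (2 * k + 1)).foldl (fun acc p => acc.insert p.1 p.2) PySem.Dict.empty).items = _
  rw [h]
  simp [PySem.Dict.empty]

lemma relabel_get (k : Int) (p : String × Int) (v : Int) (hm : (p, v) ∈ pvPairs (2 * k + 1)) :
    (pvFlowerRelabel k).get? p = some v := by
  apply PySem.Dict.get?_of_mem_items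
  · rw [relabel_items]; exact hm
  · show ((pvFlowerRelabel k).items.map (fun p => p.1)).Nodup
    rw [relabel_items]
    rw [map_fst_pvPairs]
    exact nodup_pvL _

lemma get_a (k i : Int) (h0 : 0 ≤ i) (h1 : i < 2 * k + 1) :
    (pvFlowerRelabel k).get? ("a", i) = some i := by
  apply relabel_get
  simp only [pvPairs, List.mem_append, List.mem_map, List.mem_range]
  refine Or.inl (Or.inl (Or.inl ⟨i.toNat, by omega, ?_⟩))
  simp only [Prod.mk.injEq]
  refine ⟨⟨trivial, by omega⟩, by omega⟩

lemma get_b (k i : Int) (h0 : 0 ≤ i) (h1 : i < 2 * k + 1) :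
    (pvFlowerRelabel k).get? ("b", i) = some ((2 * k + 1) + i) := by
  apply relabel_get
  simp only [pvPairs, List.mem_append, List.mem_map, List.mem_range]
  refine Or.inl (Or.inl (Or.inr ⟨i.toNat, by omega, ?_⟩))
  simp only [Prod.mk.injEq]
  refine ⟨⟨trivial, by omega⟩, by omega⟩

lemma get_c (k i : Int) (h0 : 0 ≤ i) (h1 : i < 2 * k + 1) :
    (pvFlowerRelabel k).get? ("c", i) = some (2 * (2 * k + 1) + i) := by
  apply relabel_get
  simp only [pvPairs, List.mem_append, List.mem_map, List.mem_range]
  refine Or.inl (Or.inr ⟨i.toNat, by omega, ?_⟩)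
  simp only [Prod.mk.injEq]
  refine ⟨⟨trivial, by omega⟩, by omega⟩

lemma get_d (k i : Int) (h0 : 0 ≤ i) (h1 : i < 2 * k + 1) :
    (pvFlowerRelabel k).get? ("d", i) = some (3 * (2 * k + 1) + i) := by
  apply relabel_get
  simp only [pvPairs, List.mem_append, List.mem_map, List.mem_range]
  refine Or.inr ⟨i.toNat, by omega, ?_⟩
  simp only [Prod.mk.injEq]
  refine ⟨⟨trivial, by omega⟩, by omega⟩

lemma toInt_b (k : Int) :
    pvToIntCycle ((PySem.List.pyRange 0 (2 * k + 1) 1).map (fun i => ("b", i))) (pvFlowerRelabel k)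
      = (PySem.List.pyRange 0 (2 * k + 1) 1).map (fun i => (2 * k + 1) + i) := by
  unfold pvToIntCycle
  rw [List.map_map]
  refine List.map_congr_left ?_
  intro i hi
  rw [PySem.List.mem_pyRange_one] at hi
  simp only [Function.comp]
  rw [get_b k i hi.1 hi.2]
  rfl

lemma toInt_cd (k : Int) :
    pvToIntCycle ((PySem.List.pyRange 0 (2 * k + 1) 1).map (fun i => ("c", i))
        ++ (PySem.List.pyRange 0 (2 * k + 1) 1).map (fun i => ("d", i))) (pvFlowerRelabel k)
      = (PySem.List.pyRange 0 (2 * k + 1) 1).map (fun i => 2 * (2 * k + 1) + i)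
        ++ (PySem.List.pyRange 0 (2 * k + 1) 1).map (fun i => 3 * (2 * k + 1) + i) := by
  unfold pvToIntCycle
  rw [List.map_append, List.map_map, List.map_map]
  congr 1 <;>
  · refine List.map_congr_left ?_
    intro i hi
    rw [PySem.List.mem_pyRange_one] at hi
    simp only [Function.comp]
    first
      | rw [get_c k i hi.1 hi.2]
      | rw [get_d k i hi.1 hi.2]
    rfl

lemma toInt_shut_c (k i : Int) (h0 : 0 ≤ i) (h1 : i < 2 * k + 1 - 1) :
    pvToIntCycle [("a", i), ("b", i), ("b", i + 1), ("a", i + 1), ("c", i + 1), ("c", i)]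
        (pvFlowerRelabel k)
      = [i, (2 * k + 1) + i, (2 * k + 1) + i + 1, i + 1,
          2 * (2 * k + 1) + i + 1, 2 * (2 * k + 1) + i] := by
  unfold pvToIntCycle
  rw [List.map_cons, List.map_cons, List.map_cons, List.map_cons, List.map_cons,
    List.map_cons, List.map_nil]
  rw [get_a k i h0 (by omega), get_b k i h0 (by omega), get_b k (i + 1) (by omega) (by omega),
    get_a k (i + 1) (by omega) (by omega), get_c k (i + 1) (by omega) (by omega),
    get_c k i h0 (by omega)]
  simp only [Option.getD_some]
  refine ?_
  norm_num
  exact ⟨by ring, by ring⟩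

lemma toInt_shut_d (k i : Int) (h0 : 0 ≤ i) (h1 : i < 2 * k + 1 - 1) :
    pvToIntCycle [("a", i), ("b", i), ("b", i + 1), ("a", i + 1), ("d", i + 1), ("d", i)]
        (pvFlowerRelabel k)
      = [i, (2 * k + 1) + i, (2 * k + 1) + i + 1, i + 1,
          3 * (2 * k + 1) + i + 1, 3 * (2 * k + 1) + i] := by
  unfold pvToIntCycle
  rw [List.map_cons, List.map_cons, List.map_cons, List.map_cons, List.map_cons,
    List.map_cons, List.map_nil]
  rw [get_a k i h0 (by omega), get_b k i h0 (by omega), get_b k (i + 1) (by omega) (by omega),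
    get_a k (i + 1) (by omega) (by omega), get_d k (i + 1) (by omega) (by omega),
    get_d k i h0 (by omega)]
  simp only [Option.getD_some]
  refine ?_
  norm_num
  exact ⟨by ring, by ring⟩

lemma flower_equal_all : ∀ (k : Int), flower_cdc_v1 k = flower_cdc_v1_alt k := by
  intro k
  simp only [flower_cdc_v1, flower_cdc_v1_alt]
  rw [PySem.List.foldl_append_singleton_eq_map, PySem.List.foldl_append_singleton_eq_map,
    PySem.List.foldl_append_singleton_eq_map, PySem.List.foldl_append_singleton_eq_map]
  simp only [List.nil_append, List.map_append, List.map_cons, List.map_nil, List.map_map]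
  congr 1
  · congr 1
    · rw [toInt_b k, toInt_cd k]
      rfl
    · refine List.map_congr_left ?_
      intro i hi
      rw [PySem.List.mem_pyRange_one] at hi
      simp only [Function.comp]
      exact toInt_shut_c k i hi.1 hi.2
  · refine List.map_congr_left ?_
    intro i hi
    rw [PySem.List.mem_pyRange_one] at hi
    simp only [Function.comp]
    exact toInt_shut_d k i hi.1 hi.2

-- ===== VERDICT (by name: the statement is the Claim_ definition above) =====
theorem flower_cdc_v1_spec : Claim_equal_flower_cdc_v1 := by
  intro k _
  exact flower_equal_all k
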